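-- pv_equiv track=rewrite | github.com/samyakjain101/DSA | bit_manupulation/q011_same_set_bits_as_of_n.py | solve
-- ===== SOURCE A (Python) =====
-- from math import comb
--
-- def solve(num, k, i):
--     if num == 0 or num == 1 or i == 0:
--         return 0
--
--     if num & (1 << i) == 0:
--         return solve(num, k, i-1)
--     else:
--         temp = 0
--         # Case 1: Set i-th bit as 0
--         temp += comb(i, k)
--
--         # Case 2: i-th bit remains 1
--         temp += solve(num, k-1, i-1)
--         return temp
-- ===== SOURCE B (Python) =====
-- from math import comb
--
-- def solve(num, k, i):
--     if num == 0 or num == 1 or i == 0: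
--         return 0
--     result = 0
--     for j in range(i, 0, -1):
--         if num & (1 << j):
--             result += comb(j, k)
--             k -= 1
--     return result
-- ===== Notes on version B (the rewrite author's own statement) =====
-- stated objective: simpler
-- what changed: Replaces A's tail recursion over bit positions with an explicit countdown loop accumulating the result, preserving the exact comb-call order.
import Mathlib
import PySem

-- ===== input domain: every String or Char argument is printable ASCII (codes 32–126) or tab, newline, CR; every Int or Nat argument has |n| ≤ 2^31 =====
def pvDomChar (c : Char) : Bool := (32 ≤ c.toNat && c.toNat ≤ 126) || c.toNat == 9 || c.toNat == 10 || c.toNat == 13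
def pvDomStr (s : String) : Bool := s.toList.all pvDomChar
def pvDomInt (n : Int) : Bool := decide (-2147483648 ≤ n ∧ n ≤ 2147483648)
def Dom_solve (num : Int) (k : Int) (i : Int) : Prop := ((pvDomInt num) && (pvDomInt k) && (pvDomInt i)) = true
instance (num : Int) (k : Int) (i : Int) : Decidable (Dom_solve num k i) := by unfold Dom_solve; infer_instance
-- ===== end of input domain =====

-- B replaces A's tail recursion over bit positions by an explicit countdown loop with an
-- additive accumulator (same recurrence, different decomposition; objective: simpler).

-- math.comb(n, k): raises for negative arguments (excluded by Pre_solve); 0 when k > n.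
def combP (n : Int) (k : Int) : Int := (Nat.choose n.toNat k.toNat : Int)

-- ===== PORT A =====
-- Literal port of A's recursion. Where Python raises (1 << i with i < 0, only reachable
-- when num ∉ {0,1}) the port returns 0; those inputs are outside Pre_solve.
def solve (num : Int) (k : Int) (i : Int) : Int :=
  if num = 0 ∨ num = 1 ∨ i = 0 then 0
  else if i < 0 then 0  -- Python A raises ValueError here (1 << i with negative i)
  else if PySem.Int.band num ((1 : Int) <<< i.toNat) = 0 then solve num k (i - 1)
  else combP i k + solve num (k - 1) (i - 1)
termination_by i.toNat
decreasing_by all_goals omega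

-- ===== PORT B =====
def solve_alt (num : Int) (k : Int) (i : Int) : Int :=
  if num = 0 ∨ num = 1 ∨ i = 0 then 0
  else
    ((PySem.List.pyRange i 0 (-1)).foldl
      (fun (st : Int × Int) (j : Int) =>
        if PySem.Int.band num ((1 : Int) <<< j.toNat) ≠ 0 then (st.1 + combP j st.2, st.2 - 1) else st)
      (0, k)).1

-- ===== PRECONDITION & SPEC =====
-- Pre_solve excludes exactly the inputs where Python A raises: i < 0 (ValueError from 1 << i)
-- and inputs whose set-bit count in positions 1..i exceeds k+1 (math.comb with negative k).
-- Number of set bits of num in positions 1..i.  On the stated domain |num| ≤ 2^31 the bits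
-- above position 64 are 0 for num ≥ 0 and 1 for num < 0, so the count over 1..i is the count
-- over 1..min i 64 plus a closed-form tail; this keeps the condition cheap to decide.
def pvSetBits (num : Int) (i : Int) : Int :=
  (((List.range (min i.toNat 64)).filter
      (fun j => PySem.Int.band num ((1 : Int) <<< (j + 1)) ≠ 0)).length : Int)
  + (if num < 0 then max (i - 64) 0 else 0)

def Pre_solve (num : Int) (k : Int) (i : Int) : Prop :=
  num = 0 ∨ num = 1 ∨ (0 ≤ i ∧ (pvSetBits num i = 0 ∨ pvSetBits num i ≤ k + 1))
instance (num : Int) (k : Int) (i : Int) : Decidable (Pre_solve num k i) := by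
  unfold Pre_solve; infer_instance

def pvWitness_solve : Int × Int × Int := (11, 2, 3)

def Spec_solve (num : Int) (k : Int) (i : Int) (out : Int) : Prop := out = solve_alt num k i
instance (num : Int) (k : Int) (i : Int) (out : Int) : Decidable (Spec_solve num k i out) := by
  unfold Spec_solve; infer_instance

-- ===== CLAIM (what is proved, stated in full; the proofs are below) =====
def Claim_equal_solve : Prop := ∀ (num : Int) (k : Int) (i : Int), Dom_solve num k i → Pre_solve num k i → Spec_solve num k i (solve num k i)

-- ===== LEMMAS AND PROOFS =====

-- The loop body of B.
def pvStep (num : Int) (st : Int × Int) (j : Int) : Int × Int :=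
  if PySem.Int.band num ((1 : Int) <<< j.toNat) ≠ 0 then (st.1 + combP j st.2, st.2 - 1) else st

lemma pvStep_eq (num : Int) :
    (fun (st : Int × Int) (j : Int) =>
      if PySem.Int.band num ((1 : Int) <<< j.toNat) ≠ 0 then (st.1 + combP j st.2, st.2 - 1) else st)
    = pvStep num := rfl

-- Result component shifts additively with the initial accumulator; k-component ignores it.
lemma pvFoldl_shift (num : Int) (l : List Int) (r k : Int) :
    (l.foldl (pvStep num) (r, k)).1 = r + (l.foldl (pvStep num) (0, k)).1
    ∧ (l.foldl (pvStep num) (r, k)).2 = (l.foldl (pvStep num) (0, k)).2 := by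
  induction l generalizing r k with
  | nil => simp
  | cons a t ih =>
    simp only [List.foldl_cons, pvStep]
    split
    · have h1 := ih (r + combP a k) (k - 1)
      have h2 := ih (0 + combP a k) (k - 1)
      constructor
      · rw [h1.1, h2.1]; ring
      · rw [h1.2, h2.2]
    · exact ih r k

-- Main invariant: for i = n ≥ 0 and num ∉ {0,1}, A's recursion equals B's countdown fold.
lemma pvMain (num : Int) (h0 : ¬ num = 0) (h1 : ¬ num = 1) (n : Nat) :
    ∀ k : Int, solve num k (n : Int) = ((PySem.List.pyRange (n : Int) 0 (-1)).foldl (pvStep num) (0, k)).1 := by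
  induction n with
  | zero =>
    intro k
    rw [PySem.List.pyRange_neg_one_eq_nil (by norm_num)]
    simp [solve]
  | succ m ih =>
    intro k
    have hc : ((m + 1 : Nat) : Int) = (m : Int) + 1 := by push_cast; ring
    rw [hc]
    rw [PySem.List.pyRange_neg_one_cons (by positivity)]
    rw [solve]
    have htn : ((m : Int) + 1).toNat = m + 1 := by omega
    have hm1 : ((m : Int) + 1) - 1 = (m : Int) := by ring
    rw [if_neg (by push_neg; exact ⟨h0, h1, by omega⟩), if_neg (by omega)]
    simp only [List.foldl_cons]
    by_cases hbit : PySem.Int.band num ((1 : Int) <<< (m + 1)) = 0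
    · rw [if_pos (by rw [htn]; exact hbit)]
      rw [hm1, ih k]
      have hstep : pvStep num (0, k) ((m : Int) + 1) = (0, k) := by
        simp only [pvStep, htn]
        rw [if_neg (by simpa using hbit)]
      rw [hstep]
    · rw [if_neg (by rw [htn]; exact hbit)]
      rw [hm1, ih (k - 1)]
      have hstep : pvStep num (0, k) ((m : Int) + 1)
          = (0 + combP ((m : Int) + 1) k, k - 1) := by
        simp only [pvStep, htn]
        rw [if_pos hbit]
      rw [hstep]
      have := pvFoldl_shift num (PySem.List.pyRange (m : Int) 0 (-1)) (0 + combP ((m : Int) + 1) k) (k - 1)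
      rw [this.1]
      ring

-- ===== VERDICT (by name: the statement is the Claim_ definition above) =====
theorem solve_spec : Claim_equal_solve := by
  intro num k i _ hpre
  unfold Spec_solve solve_alt
  rw [pvStep_eq]
  by_cases hg : num = 0 ∨ num = 1 ∨ i = 0
  · rw [if_pos hg]
    rcases hg with h | h | h <;> simp [solve, h]
  · push_neg at hg
    obtain ⟨h0, h1, hi0⟩ := hg
    have hi : 0 ≤ i := by
      rcases hpre with h | h | h
      · exact absurd h h0
      · exact absurd h h1
      · exact h.1
    rw [if_neg (by push_neg; exact ⟨h0, h1, hi0⟩)]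
    have : i = (i.toNat : Int) := by omega
    rw [this]
    exact pvMain num h0 h1 i.toNat k
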